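-- pv_equiv track=rewrite | github.com/r1cc4rdo/daily_coding_problem | legacy/daily_coding_problem_01_05.py | coding_problem_01
-- ===== SOURCE A (Python) =====
-- from collections import deque
--
-- def coding_problem_01(stack):
--     """
--     Given a stack of N elements, interleave the first half of the stack
--     with the second half reversed using one other queue.
--     Example:
--
--     >>> coding_problem_01([1, 2, 3, 4, 5])
--     [1, 5, 2, 4, 3]
--     >>> coding_problem_01([1, 2, 3, 4, 5, 6])
--     [1, 6, 2, 5, 3, 4]
--
--     Note: with Python lists, you could instead islice(chain.from_iterable(izip(l, reversed(l))), len(l))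
--     """
--     queue = deque([])  # stack S:[1,2,3,4,5], queue Q:[]
--     for cnt in range(len(stack) - 1):  # move stack into queue. S:[1], Q:[5,4,3,2]
--         queue.append(stack.pop())
--     for cnt in range(len(queue) // 2):
--         stack.append(queue.popleft())  # S:[1,5], Q:[4,3,2]
--         for cnt2 in range(len(queue) - 1):  # rotate last element to front, S:[1,5], Q:[2,4,3]
--             queue.append(queue.popleft())
--         stack.append(queue.popleft())  # S:[1,5,2], Q:[4,3]
--     if queue:
--         stack.append(queue.popleft())
--     return stack
-- ===== SOURCE B (Python) =====
-- def coding_problem_01(stack):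
--     i, j = 0, len(stack) - 1
--     result = []
--     while i <= j:
--         result.append(stack[i])
--         if i != j:
--             result.append(stack[j])
--         i += 1
--         j -= 1
--     stack[:] = result  # write back: mutate the argument like A does
--     return stack
-- ===== Notes on version B (the rewrite author's own statement) =====
-- stated objective: faster
-- what changed: Replaces the deque with repeated O(k) rotation loops by a direct two-pointer sweep over indices that builds the interleaving in one pass and writes it back with stack[:] = result.
import Mathlib
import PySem

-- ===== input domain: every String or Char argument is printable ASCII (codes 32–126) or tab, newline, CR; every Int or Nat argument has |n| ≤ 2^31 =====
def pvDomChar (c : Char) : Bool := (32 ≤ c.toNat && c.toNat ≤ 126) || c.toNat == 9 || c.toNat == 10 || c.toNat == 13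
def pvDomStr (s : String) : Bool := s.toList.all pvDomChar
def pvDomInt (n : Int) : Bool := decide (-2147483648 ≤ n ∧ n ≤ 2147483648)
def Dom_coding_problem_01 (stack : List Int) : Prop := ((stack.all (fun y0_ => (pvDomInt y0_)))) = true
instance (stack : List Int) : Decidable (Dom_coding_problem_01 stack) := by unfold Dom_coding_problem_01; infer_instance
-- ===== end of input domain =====

-- B replaces A's deque-with-rotation (quadratic) by a linear two-pointer sweep; both
-- Pythons mutate the argument list in place and return that same object, and the two
-- mutations agree, so proving the return values equal covers the side effect too.

-- ===== PORT A =====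
-- `queue.append(queue.popleft())` : queue is nonempty whenever this runs, so headD/tail are exact
def cpRot (q : List Int) : List Int := q.tail ++ [q.headD 0]

-- body of `for cnt in range(len(queue)//2)`
def cpStep (sq : List Int × List Int) : List Int × List Int :=
  let s := sq.1 ++ [sq.2.headD 0]                                  -- stack.append(queue.popleft())
  let q := sq.2.tail
  let q := List.foldl (fun qq _ => cpRot qq) q (List.range (q.length - 1))  -- rotate last to front
  (s ++ [q.headD 0], q.tail)                                       -- stack.append(queue.popleft())

def coding_problem_01 (stack : List Int) : List Int :=
  -- for cnt in range(len(stack) - 1): queue.append(stack.pop())   (stack nonempty whenever pop runs)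
  let sq := List.foldl
    (fun (sq : List Int × List Int) _ => (sq.1.dropLast, sq.2 ++ [sq.1.getLast?.getD 0]))
    (stack, []) (List.range (stack.length - 1))
  let sq := List.foldl (fun sq _ => cpStep sq) sq (List.range (sq.2.length / 2))
  if sq.2 = [] then sq.1 else sq.1 ++ [sq.2.headD 0]               -- if queue: stack.append(queue.popleft())

-- ===== PORT B =====
-- the while loop of Source B; 0 ≤ i ≤ j < len whenever an index is read, so getD is exact
def cpSweep (stack : List Int) (i j : Int) (result : List Int) : List Int :=
  if i ≤ j then
    let result := result ++ [stack.getD i.toNat 0]                 -- result.append(stack[i])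
    let result := if i ≠ j then result ++ [stack.getD j.toNat 0] else result
    cpSweep stack (i + 1) (j - 1) result
  else result
termination_by (j + 1 - i).toNat
decreasing_by omega

def coding_problem_01_alt (stack : List Int) : List Int :=
  cpSweep stack 0 ((stack.length : Int) - 1) []

-- ===== PRECONDITION & SPEC =====
def Spec_coding_problem_01 (stack : List Int) (out : List Int) : Prop := out = coding_problem_01_alt stack
instance (stack : List Int) (out : List Int) : Decidable (Spec_coding_problem_01 stack out) := by unfold Spec_coding_problem_01; infer_instance

-- ===== CLAIM (what is proved, stated in full; the proofs are below) =====
def Claim_equal_coding_problem_01 : Prop := ∀ (stack : List Int), Dom_coding_problem_01 stack → Spec_coding_problem_01 stack (coding_problem_01 stack)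

-- ===== LEMMAS AND PROOFS =====

-- the common specification: head, last, then recurse on the middle
def ilv : List Int → List Int
  | [] => []
  | [x] => [x]
  | x :: y :: ys => x :: (y :: ys).getLast?.getD 0 :: ilv ((y :: ys).dropLast)
termination_by l => l.length
decreasing_by simp

def swapIlv (m : List Int) : List Int :=
  match m with
  | [] => []
  | _ => m.getLast?.getD 0 :: ilv m.dropLast

theorem ilv_nil : ilv [] = [] := by rw [ilv]

theorem ilv_one (x : Int) : ilv [x] = [x] := by rw [ilv]

theorem ilv_cons_ne (x : Int) (xs : List Int) (h : xs ≠ []) :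
    ilv (x :: xs) = x :: xs.getLast?.getD 0 :: ilv xs.dropLast := by
  cases xs with
  | nil => exact absurd rfl h
  | cons y ys => rw [ilv]

theorem ilv_cons (x : Int) (m : List Int) : ilv (x :: m) = x :: swapIlv m := by
  cases m with
  | nil => simp [ilv_one, swapIlv]
  | cons y ys => rw [ilv_cons_ne x (y :: ys) (by simp)]; rfl

theorem ilv_concat (a b : Int) (m : List Int) : ilv (a :: (m ++ [b])) = a :: b :: ilv m := by
  rw [ilv_cons_ne a (m ++ [b]) (by simp)]
  simp

theorem ilv_reverse (m : List Int) : ilv m.reverse = swapIlv m := by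
  induction m using List.bidirectionalRec with
  | nil => simp [ilv_nil, swapIlv]
  | singleton a => simp [ilv_one, swapIlv, ilv_nil]
  | cons_append a l b ih =>
    have h2 : swapIlv (a :: (l ++ [b])) = b :: ilv (a :: l) := by
      show (a :: (l ++ [b])).getLast?.getD 0 :: ilv (a :: (l ++ [b])).dropLast = _
      rw [show a :: (l ++ [b]) = (a :: l) ++ [b] by simp, List.getLast?_concat,
        List.dropLast_concat]
      rfl
    rw [show (a :: (l ++ [b])).reverse = b :: (l.reverse ++ [a]) by simp]
    rw [ilv_concat b a l.reverse, ih, h2, ilv_cons]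

-- a fold over `range k` with a body ignoring the counter is iteration
theorem foldl_const_range {α : Type} (f : α → α) (k : Nat) (a : α) :
    List.foldl (fun s _ => f s) a (List.range k) = f^[k] a := by
  induction k generalizing a with
  | zero => rfl
  | succ n ih => rw [List.range_succ, List.foldl_append, ih, Function.iterate_succ_apply']; rfl

theorem cpRot_rotate (q : List Int) (h : q ≠ []) : cpRot q = q.rotate 1 := by
  cases q with
  | nil => exact absurd rfl h
  | cons x xs => simp [cpRot]

theorem cpRot_iter (k : Nat) (q : List Int) (h : q ≠ []) : cpRot^[k] q = q.rotate k := by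
  induction k generalizing q with
  | zero => simp
  | succ n ih =>
    rw [Function.iterate_succ_apply, cpRot_rotate q h, ih]
    · rw [List.rotate_rotate]; ring_nf
    · intro hc
      have : (q.rotate 1).length = 0 := by rw [hc]; rfl
      simp at this
      exact h this

theorem rot_last (q : List Int) (h : q ≠ []) :
    cpRot^[q.length - 1] q = q.getLast?.getD 0 :: q.dropLast := by
  rw [cpRot_iter _ _ h]
  rw [List.rotate_eq_drop_append_take (by omega)]
  have h1 : q.drop (q.length - 1) = [q.getLast?.getD 0] := by
    induction q with
    | nil => exact absurd rfl h
    | cons x xs ih =>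
      cases xs with
      | nil => rfl
      | cons y ys => simpa using ih (by simp)
  rw [h1, List.dropLast_eq_take]
  rfl

-- the first loop moves the whole suffix m, reversed, onto the queue
theorem first_loop (m : List Int) : ∀ (s q : List Int),
    (fun (sq : List Int × List Int) => (sq.1.dropLast, sq.2 ++ [sq.1.getLast?.getD 0]))^[m.length]
      (s ++ m, q) = (s, q ++ m.reverse) := by
  induction m using List.reverseRecOn with
  | nil => simp
  | append_singleton ms b ih =>
    intro s q
    rw [show (ms ++ [b]).length = ms.length + 1 by simp, Function.iterate_succ_apply]
    have hstep : (((s ++ (ms ++ [b]), q).1.dropLast : List Int),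
        ((s ++ (ms ++ [b]), q).2 ++ [(s ++ (ms ++ [b]), q).1.getLast?.getD 0] : List Int))
        = (s ++ ms, q ++ [b]) := by
      simp [← List.append_assoc]
    rw [hstep, ih s (q ++ [b])]
    simp

theorem cpStep_eq (s : List Int) (x : Int) (t : List Int) (h : t ≠ []) :
    cpStep (s, x :: t) = (s ++ [x, t.getLast?.getD 0], t.dropLast) := by
  simp only [cpStep, List.headD_cons, List.tail_cons]
  rw [foldl_const_range cpRot, rot_last t h]
  simp

-- the main loop plus the trailing `if queue:` produce s ++ ilv q
theorem main_loop (q : List Int) : ∀ (s : List Int),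
    (if (cpStep^[q.length / 2] (s, q)).2 = [] then (cpStep^[q.length / 2] (s, q)).1
      else (cpStep^[q.length / 2] (s, q)).1 ++ [(cpStep^[q.length / 2] (s, q)).2.headD 0])
      = s ++ ilv q := by
  match q with
  | [] => intro s; simp [ilv_nil]
  | [x] => intro s; simp [ilv_one]
  | a :: b :: t =>
    intro s
    rw [show (a :: b :: t).length / 2 = (b :: t).dropLast.length / 2 + 1 by simp; omega]
    rw [Function.iterate_succ_apply, cpStep_eq s a (b :: t) (by simp)]
    rw [main_loop ((b :: t).dropLast) (s ++ [a, (b :: t).getLast?.getD 0])]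
    rw [ilv_cons_ne a (b :: t) (by simp)]
    simp
termination_by q.length
decreasing_by simp

theorem portA_eq_ilv (l : List Int) : coding_problem_01 l = ilv l := by
  cases l with
  | nil => simp [coding_problem_01, ilv_nil]
  | cons h t =>
    simp only [coding_problem_01]
    rw [foldl_const_range
      (fun (sq : List Int × List Int) => (sq.1.dropLast, sq.2 ++ [sq.1.getLast?.getD 0]))]
    rw [show (h :: t).length - 1 = t.length by simp]
    rw [show ((h :: t : List Int), ([] : List Int)) = (([h] : List Int) ++ t, ([] : List Int)) by simp]
    rw [first_loop t [h] []]
    rw [foldl_const_range cpStep]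
    simpa [ilv_reverse, ilv_cons] using main_loop t.reverse [h]

-- reading position pre.length in pre ++ (x :: rest) yields x
theorem getD_at_len (pre rest : List Int) (x : Int) :
    (pre ++ (x :: rest)).getD pre.length 0 = x := by
  induction pre with
  | nil => rfl
  | cons p ps _ => simp

-- B's sweep reads the head of mid at index i and its last element at index j
theorem sweep_eq (mid : List Int) : ∀ (pre post acc : List Int),
    cpSweep (pre ++ mid ++ post) (pre.length : Int)
      ((pre.length : Int) + mid.length - 1) acc = acc ++ ilv mid := by
  induction mid using List.bidirectionalRec with
  | nil =>
    intro pre post acc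
    rw [cpSweep]
    rw [if_neg (by simp only [List.length_nil]; omega)]
    simp [ilv_nil]
  | singleton x =>
    intro pre post acc
    rw [cpSweep]
    rw [if_pos (by simp only [List.length_cons, List.length_nil]; omega)]
    simp only []
    rw [if_neg (by simp only [List.length_cons, List.length_nil]; omega)]
    rw [cpSweep]
    rw [if_neg (by simp only [List.length_cons, List.length_nil]; omega)]
    have hx : (pre ++ [x] ++ post).getD (Int.toNat pre.length) 0 = x := by
      rw [Int.toNat_natCast, List.append_assoc]
      exact getD_at_len pre post x
    rw [hx]
    simp [ilv_one]
  | cons_append a m b ih =>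
    intro pre post acc
    rw [cpSweep]
    rw [if_pos (by simp only [List.length_cons, List.length_append, List.length_nil]; omega)]
    simp only []
    rw [if_pos (by simp only [List.length_cons, List.length_append, List.length_nil]; omega)]
    have ha : (pre ++ (a :: (m ++ [b])) ++ post).getD (Int.toNat pre.length) 0 = a := by
      rw [Int.toNat_natCast, List.append_assoc]
      exact getD_at_len pre ((m ++ [b]) ++ post) a
    have hb : (pre ++ (a :: (m ++ [b])) ++ post).getD
        (Int.toNat ((pre.length : Int) + (a :: (m ++ [b])).length - 1)) 0 = b := by
      rw [show Int.toNat ((pre.length : Int) + (a :: (m ++ [b])).length - 1)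
            = (pre ++ a :: m).length by
          simp only [List.length_cons, List.length_append, List.length_nil]; omega]
      rw [show pre ++ (a :: (m ++ [b])) ++ post = (pre ++ a :: m) ++ (b :: post) by simp]
      exact getD_at_len (pre ++ a :: m) post b
    rw [ha, hb]
    have harg2 : ((pre.length : Int) + (a :: (m ++ [b])).length - 1) - 1
        = ((pre ++ [a]).length : Int) + m.length - 1 := by
      simp only [List.length_cons, List.length_append, List.length_nil]; push_cast; omega
    have harg1 : (pre.length : Int) + 1 = ((pre ++ [a]).length : Int) := by
      simp only [List.length_append, List.length_cons, List.length_nil]; push_cast; omega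
    have hlist : pre ++ (a :: (m ++ [b])) ++ post = (pre ++ [a]) ++ m ++ (b :: post) := by simp
    rw [harg1, harg2, hlist, ih (pre ++ [a]) (b :: post) (acc ++ [a] ++ [b])]
    rw [ilv_concat]
    simp

theorem portB_eq_ilv (l : List Int) : coding_problem_01_alt l = ilv l := by
  have := sweep_eq l [] [] []
  simp only [List.nil_append, List.append_nil, List.length_nil] at this
  simpa [coding_problem_01_alt] using this

-- ===== VERDICT (by name: the statement is the Claim_ definition above) =====
theorem coding_problem_01_spec : Claim_equal_coding_problem_01 := by
  intro stack _
  show _ = _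
  rw [portA_eq_ilv, portB_eq_ilv]
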